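-- pv_equiv track=rewrite | github.com/pinobatch/240p-test-mini | gameboy/tools/chrencoding.py | decode_240ptxt
-- ===== SOURCE A (Python) =====
-- decode_240ptxt_table = {
--     130: '\u00A9',  # copyright
--     131: '\U0001F426',  # bird
--     132: '\u2192',  # right
--     133: '\u2190',  # left
--     134: '\u2191',  # up
--     135: '\u2193',  # down
-- }
--
-- def UnicodeDecodeErrorKW(encoding=None, object=None,
--                          start=None, end=None, reason=None):
--     """Convenience factory for UnicodeEncodeError that accepts keyword arguments.
--
-- See help(UnicodeEncodeErrorKW) for signature.
-- """
--     return UnicodeDecodeError(encoding, object, start, end, reason)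
--
-- def decode_240ptxt(blo, errors='strict'):
--     out, firsterr, lasterr = [], None, 0
--     for i, bvalue in enumerate(blo):
--         # values 0-127 are same as ascii
--         if bvalue < 128:
--             out.append(chr(bvalue))
--             continue
--         try:
--             out.append(decode_240ptxt_table[bvalue])
--         except KeyError:
--             lasterr = i
--             if firsterr is None: firsterr = i
--             if errors != 'ignore': out.append('\uFFFD')
--     if firsterr is not None and errors == 'strict':
--         raise UnicodeDecodeErrorKW(
--             encoding='240ptxt',
--             reason='no code point for 0x%02x' % blo[firsterr],
--             object=blo, start=firsterr, end=lasterr + 1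
--         )
--     return ''.join(out)
-- ===== SOURCE B (Python) =====
-- decode_240ptxt_table = {
--     130: '\u00A9',  # copyright
--     131: '\U0001F426',  # bird
--     132: '\u2192',  # right
--     133: '\u2190',  # left
--     134: '\u2191',  # up
--     135: '\u2193',  # down
-- }
--
-- def _dec(b, errors):
--     if b < 128:
--         return chr(b)
--     c = decode_240ptxt_table.get(b)
--     if c is not None:
--         return c
--     return '' if errors == 'ignore' else '\uFFFD'
--
-- def decode_240ptxt(blo, errors='strict'):
--     # pass 1: detect invalid bytes; pass 2: build the text
--     errs = [i for i, b in enumerate(blo) if b >= 128 and b not in decode_240ptxt_table]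
--     if errs and errors == 'strict':
--         raise UnicodeDecodeError('240ptxt', blo, errs[0], errs[-1] + 1,
--                                  'no code point for 0x%02x' % blo[errs[0]])
--     return ''.join(_dec(b, errors) for b in blo)
-- ===== Notes on version B (the rewrite author's own statement) =====
-- stated objective: alternative
-- what changed: Replaces A's single interleaved loop that tracks firsterr/lasterr sentinels while appending to an accumulator with a detect-then-build decomposition: a first pass lists invalid byte indices (deciding the strict raise), then a second pass maps each byte through a small pure decoder helper and joins.
import Mathlib
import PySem

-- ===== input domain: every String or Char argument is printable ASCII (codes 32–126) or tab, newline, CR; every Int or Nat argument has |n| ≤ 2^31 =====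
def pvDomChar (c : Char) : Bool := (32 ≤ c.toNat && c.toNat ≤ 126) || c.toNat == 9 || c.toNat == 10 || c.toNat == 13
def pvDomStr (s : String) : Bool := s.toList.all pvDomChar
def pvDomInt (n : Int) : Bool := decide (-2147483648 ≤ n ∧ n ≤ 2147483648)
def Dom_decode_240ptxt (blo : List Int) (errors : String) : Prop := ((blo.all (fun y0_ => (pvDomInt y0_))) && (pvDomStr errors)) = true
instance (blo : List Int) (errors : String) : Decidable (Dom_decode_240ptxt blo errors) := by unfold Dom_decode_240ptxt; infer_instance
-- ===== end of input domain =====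

-- B replaces A's interleaved error-sentinel tracking with a detect-then-build two-pass
-- decomposition (error indices listed first, then a per-byte decode map + join); same cost.


-- module-level constant shared by A and B (as in the Python module); 0x1F426 is '\U0001F426' (bird)
def decode_240ptxt_table : PySem.Dict Int String :=
  PySem.Dict.ofList [(130, "\u00A9"), (131, (Char.ofNat 0x1F426).toString), (132, "\u2192"),
                     (133, "\u2190"), (134, "\u2191"), (135, "\u2193")]

-- ===== PORT A =====
-- A's loop: state (out, firsterr, lasterr); the strict raise after the loop is outside Pre_.
def decode_240ptxt (blo : List Int) (errors : String) : String :=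
  let st := (PySem.List.enumerate blo).foldl
    (fun (st : List String × Option Int × Int) p =>
      let out := st.1; let firsterr := st.2.1; let lasterr := st.2.2
      let i := p.1; let bvalue := p.2
      if bvalue < 128 then
        (out ++ [(Char.ofNat bvalue.toNat).toString], firsterr, lasterr)
      else
        match decode_240ptxt_table.get? bvalue with
        | some s => (out ++ [s], firsterr, lasterr)
        | none =>
          let lasterr := i
          let firsterr := if firsterr.isNone then some i else firsterr
          if errors ≠ "ignore" then (out ++ ["\uFFFD"], firsterr, lasterr)
          else (out, firsterr, lasterr))
    ([], none, 0)
  -- 'if firsterr is not None and errors == "strict": raise …' — raising inputs are outside Pre_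
  PySem.Str.join "" st.1

-- ===== PORT B =====
def pvDec (b : Int) (errors : String) : String :=
  if b < 128 then (Char.ofNat b.toNat).toString
  else
    match decode_240ptxt_table.get? b with
    | some c => c
    | none => if errors = "ignore" then "" else "\uFFFD"

-- B: the detect pass (errs) only decides the strict raise — outside Pre_ — then the build pass.
def decode_240ptxt_alt (blo : List Int) (errors : String) : String :=
  PySem.Str.join "" (blo.map (fun b => pvDec b errors))

-- ===== PRECONDITION & SPEC =====
-- Pre_ excludes exactly the inputs on which A raises: a negative byte (chr raises ValueError),
-- or errors == 'strict' together with a high byte outside the table (UnicodeDecodeError).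
def Pre_decode_240ptxt (blo : List Int) (errors : String) : Prop :=
  (∀ b ∈ blo, 0 ≤ b) ∧ (errors = "strict" → ∀ b ∈ blo, b < 128 ∨ (130 ≤ b ∧ b ≤ 135))
instance (blo : List Int) (errors : String) : Decidable (Pre_decode_240ptxt blo errors) := by
  unfold Pre_decode_240ptxt; infer_instance

def pvWitness_decode_240ptxt : List Int × String := ([72, 105, 132], "strict")

def Spec_decode_240ptxt (blo : List Int) (errors : String) (out : String) : Prop := out = decode_240ptxt_alt blo errors
instance (blo : List Int) (errors : String) (out : String) : Decidable (Spec_decode_240ptxt blo errors out) := by unfold Spec_decode_240ptxt; infer_instance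

-- ===== CLAIM (what is proved, stated in full; the proofs are below) =====
def Claim_equal_decode_240ptxt : Prop := ∀ (blo : List Int) (errors : String), Dom_decode_240ptxt blo errors → Pre_decode_240ptxt blo errors → Spec_decode_240ptxt blo errors (decode_240ptxt blo errors)

-- ===== LEMMAS AND PROOFS =====

-- flattened character content of a list of strings
def pvJoinAll (l : List String) : List Char := (l.map String.toList).flatten

-- loop invariant: the character content of A's accumulator grows exactly by B's per-byte decodes
theorem pv_fold_invariant (errors : String) (xs : List (Int × Int)) :
    ∀ (st : List String × Option Int × Int),
      pvJoinAll (xs.foldl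
        (fun (st : List String × Option Int × Int) p =>
          let out := st.1; let firsterr := st.2.1; let lasterr := st.2.2
          let i := p.1; let bvalue := p.2
          if bvalue < 128 then
            (out ++ [(Char.ofNat bvalue.toNat).toString], firsterr, lasterr)
          else
            match decode_240ptxt_table.get? bvalue with
            | some s => (out ++ [s], firsterr, lasterr)
            | none =>
              let lasterr := i
              let firsterr := if firsterr.isNone then some i else firsterr
              if errors ≠ "ignore" then (out ++ ["\uFFFD"], firsterr, lasterr)
              else (out, firsterr, lasterr)) st).1
      = pvJoinAll st.1 ++ pvJoinAll (xs.map (fun p => pvDec p.2 errors)) := by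
  induction xs with
  | nil => intro st; simp [pvJoinAll]
  | cons p xs ih =>
    intro st
    rw [List.foldl_cons, ih]
    by_cases h : p.2 < 128
    · simp [pvDec, h, pvJoinAll]
    · cases hg : decode_240ptxt_table.get? p.2 with
      | some s => simp [pvDec, h, hg, pvJoinAll]
      | none =>
        by_cases hi : errors = "ignore"
        · simp [pvDec, h, hg, hi, pvJoinAll]
        · simp [pvDec, h, hg, hi, pvJoinAll]

theorem pv_flatten_intersperse_nil {α : Type} (l : List (List α)) :
    (List.intersperse ([] : List α) l).flatten = l.flatten := by
  induction l with
  | nil => rfl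
  | cons a l ih =>
    cases l with
    | nil => rfl
    | cons b m =>
      rw [List.intersperse_cons₂, List.flatten_cons, List.flatten_cons] at *
      simp [ih]

theorem pv_join_empty_sep (l : List String) :
    PySem.Str.join "" l = String.ofList (pvJoinAll l) := by
  simp only [PySem.Str.join, PySem.Chars.join, List.intercalate, pvJoinAll]
  rw [show ("" : String).toList = [] from rfl, pv_flatten_intersperse_nil]

theorem pv_map_snd_dec (errors : String) (blo : List Int) :
    (PySem.List.enumerate blo).map (fun p => pvDec p.2 errors)
      = blo.map (fun b => pvDec b errors) := by
  rw [show (fun p : Int × Int => pvDec p.2 errors)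
        = (fun b => pvDec b errors) ∘ (fun p : Int × Int => p.2) from rfl,
      ← List.map_map, PySem.List.map_snd_enumerate]

-- ===== VERDICT (by name: the statement is the Claim_ definition above) =====
theorem decode_240ptxt_spec : Claim_equal_decode_240ptxt := by
  intro blo errors _ _
  show decode_240ptxt blo errors = decode_240ptxt_alt blo errors
  unfold decode_240ptxt decode_240ptxt_alt
  rw [pv_join_empty_sep, pv_join_empty_sep,
      pv_fold_invariant errors (PySem.List.enumerate blo) ([], none, 0),
      pv_map_snd_dec]
  rfl
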